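-- pv_equiv track=rewrite | github.com/JonathanGun/Competitive-Programming-Archive | leetcode/bi111/6954.py | aupto
-- ===== SOURCE A (Python) =====
-- def ok(i):
--     stri = str(i)
--     se = sum(1 for d in stri if d in "02468")
--     so = sum(1 for d in stri if d in "13579")
--     return se == so
--
-- def aupto(nn):
--     alst, an = [None], 0
--     for n in range(1, nn + 1):
--         while len(alst) < nn + 1:
--             if ok(an):
--                 alst.append(an)
--             an += 1
--     return alst[1:]  # use alst[n] for a(n)
-- ===== SOURCE B (Python) =====
-- def _block(L):
--     # bottom-up digit DP: suff[diff] = ascending list of r-digit suffixes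
--     # (leading zeros allowed) whose even-minus-odd digit count equals diff
--     suff, p = {0: [0]}, 1
--     for r in range(1, L):
--         new = {}
--         for diff in range(-r, r + 1):
--             cur = [d * p + s for d in range(10)
--                    for s in suff.get(diff - (1 if d % 2 == 0 else -1), [])]
--             if cur:
--                 new[diff] = cur
--         suff, p = new, p * 10
--     # leading digit 1..9, suffix must cancel its parity contribution
--     return [d * p + s for d in range(1, 10)
--             for s in suff.get(-1 if d % 2 == 0 else 1, [])]
--
--
-- def aupto(nn):
--     # Digit DP instead of scanning integers: a balanced number has an even
--     # number of digits, so build, per even length L, all balanced L-digit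
--     # numbers in increasing order by a bottom-up table of suffixes keyed by
--     # their even-minus-odd digit count.
--     res, L = [], 2
--     while len(res) < nn:
--         res += _block(L)
--         L += 2
--     return res[:nn]
-- ===== Notes on version B (the rewrite author's own statement) =====
-- stated objective: faster
-- what changed: B replaces A's linear scan of all integers (testing each by string-digit counting) with a bottom-up digit DP: per even length L it builds tables of L-digit suffixes keyed by their even-minus-odd digit count and assembles the balanced numbers in increasing order, skipping odd lengths entirely.
import Mathlib
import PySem

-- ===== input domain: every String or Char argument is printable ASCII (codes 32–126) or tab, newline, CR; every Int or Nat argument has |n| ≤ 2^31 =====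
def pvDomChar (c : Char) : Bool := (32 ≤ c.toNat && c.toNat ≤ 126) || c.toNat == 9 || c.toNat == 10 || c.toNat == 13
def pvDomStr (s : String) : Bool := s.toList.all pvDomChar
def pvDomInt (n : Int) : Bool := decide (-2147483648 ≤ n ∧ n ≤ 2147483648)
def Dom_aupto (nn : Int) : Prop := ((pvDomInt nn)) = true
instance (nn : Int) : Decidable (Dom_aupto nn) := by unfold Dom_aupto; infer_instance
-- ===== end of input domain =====

-- B replaces A's scan of every integer by a bottom-up digit DP over even digit lengths
-- (tables of suffixes keyed by even-minus-odd digit count); measurably faster by a constant factor.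

-- ===== PORT A =====
-- ok(i): counts of even/odd digit characters of str(i); Python's `d in "02468"` on a
-- single character is char membership, ported as membership in the char list.
def okA (i : Int) : Bool :=
  let stri := (PySem.Int.toStr i).toList
  let se := stri.foldl (fun a d => if d ∈ "02468".toList then a + 1 else a) (0 : Int)
  let so := stri.foldl (fun a d => if d ∈ "13579".toList then a + 1 else a) (0 : Int)
  se == so

-- the inner `while len(alst) < nn + 1` loop; fuel only makes the search structurally
-- recursive (one unit per loop-body execution, threaded through the whole call), the
-- remaining fuel is returned with the state
def auptoWhileA (target : Int) : Nat → List (Option Int) → Int → (List (Option Int) × Int × Nat)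
  | 0, alst, an => (alst, an, 0)
  | fuel + 1, alst, an =>
    if PySem.List.len alst < target then
      auptoWhileA target fuel (if okA an then alst ++ [some an] else alst) (an + 1)
    else (alst, an, fuel + 1)

def aupto (nn : Int) : List Int :=
  let st := (PySem.List.pyRange 1 (nn + 1) 1).foldl
    (fun st _n => auptoWhileA (nn + 1) st.2.2 st.1 st.2.1)
    ([none], 0, 100000000000000000000)
  (st.1.drop 1).filterMap id   -- alst[1:] ; every entry after the None sentinel is an int

-- ===== PORT B =====
-- Python's `(1 if d % 2 == 0 else -1)`
def pmI (d : Int) : Int := if PySem.Int.mod d 2 == 0 then 1 else -1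

-- the list comprehension building cur for one diff
def curB (suff : PySem.Dict Int (List Int)) (p diff : Int) : List Int :=
  (PySem.List.pyRange 0 10 1).flatMap
    (fun d => (suff.getD (diff - pmI d) []).map (fun s => d * p + s))

-- one iteration of `for r in range(1, L)`: build the dict `new`
def rowB (suff : PySem.Dict Int (List Int)) (p r : Int) : PySem.Dict Int (List Int) :=
  (PySem.List.pyRange (-r) (r + 1) 1).foldl
    (fun new diff =>
      let cur := curB suff p diff
      if cur.isEmpty then new else new.insert diff cur)
    (PySem.Dict.mk [])

-- _block(L): fold the rows, then the final comprehension over leading digits 1..9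
def blockB (L : Int) : List Int :=
  let st := (PySem.List.pyRange 1 L 1).foldl
    (fun (st : PySem.Dict Int (List Int) × Int) r => (rowB st.1 st.2 r, st.2 * 10))
    (PySem.Dict.mk [((0 : Int), [(0 : Int)])], (1 : Int))
  (PySem.List.pyRange 1 10 1).flatMap
    (fun d => (st.1.getD (if PySem.Int.mod d 2 == 0 then -1 else 1) []).map (fun s => d * st.2 + s))

-- the `while len(res) < nn` loop (fuel-based structural recursion)
def loopB (t : Int) : Nat → List Int → Int → List Int
  | 0, res, _ => res
  | fuel + 1, res, L =>
    if PySem.List.len res < t then loopB t fuel (res ++ blockB L) (L + 2) else res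

def aupto_alt (nn : Int) : List Int :=
  PySem.List.slice (loopB nn 64 [] 2) none (some nn)   -- res[:nn]

-- ===== PRECONDITION & SPEC =====
def Spec_aupto (nn : Int) (out : List Int) : Prop := out = aupto_alt nn
instance (nn : Int) (out : List Int) : Decidable (Spec_aupto nn out) := by unfold Spec_aupto; infer_instance

-- ===== CLAIM (what is proved, stated in full; the proofs are below) =====
def Claim_equal_aupto : Prop := ∀ (nn : Int), Dom_aupto nn → Spec_aupto nn (aupto nn)

-- ===== LEMMAS AND PROOFS =====

-- signed even-minus-odd digit count of a natural number (proof-side characterisation)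
def ddNat (n : Nat) : Int :=
  (if n % 10 % 2 = 0 then 1 else -1) + (if n / 10 = 0 then 0 else ddNat (n / 10))
decreasing_by omega

-- even-count minus odd-count of a character list
def cdiff (cs : List Char) : Int :=
  (cs.countP (fun d => d ∈ "02468".toList) : Int) - (cs.countP (fun d => d ∈ "13579".toList) : Int)

lemma cdiff_digit_cons (r : Nat) (h : r < 10) (ds : List Char) :
    cdiff (Nat.digitChar r :: ds) = (if r % 2 = 0 then 1 else -1) + cdiff ds := by
  interval_cases r <;> simp [cdiff, Nat.digitChar] <;> ring

lemma cdiff_toDigitsCore (n : Nat) : ∀ (fuel : Nat) (ds : List Char), n < fuel →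
    cdiff (Nat.toDigitsCore 10 fuel n ds) = ddNat n + cdiff ds := by
  induction n using Nat.strong_induction_on with
  | _ n IH =>
    intro fuel ds h
    match fuel, h with
    | f + 1, h =>
      rw [ddNat]
      simp only [Nat.toDigitsCore]
      have hmm : n % 10 % 2 = n % 2 := by omega
      by_cases hz : n / 10 = 0
      · rw [if_pos hz, cdiff_digit_cons (n % 10) (by omega) ds, hmm]
        simp [hz]
      · rw [if_neg hz, IH (n / 10) (by omega) f (Nat.digitChar (n % 10) :: ds) (by omega),
            cdiff_digit_cons (n % 10) (by omega) ds, hmm]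
        simp [hz]
        ring

lemma okA_eq (n : Nat) : okA (n : Int) = decide (ddNat n = 0) := by
  have hchars : (PySem.Int.toStr (n : Int)).toList = Nat.toDigits 10 n := by
    rw [PySem.Int.toList_toStr]
    simp [PySem.Int.toChars]
  have hd : cdiff (Nat.toDigits 10 n) = ddNat n := by
    have := cdiff_toDigitsCore n (n + 1) [] (by omega)
    simpa [Nat.toDigits, cdiff] using this
  have hcount : ∀ (L : List Char) (cs : List Char),
      cs.foldl (fun a d => if d ∈ L then a + 1 else a) (0 : Int) = (cs.countP (fun d => d ∈ L) : Int) := by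
    intro L cs
    simpa using PySem.List.foldl_count_if (fun d => decide (d ∈ L)) cs 0
  rw [okA]
  simp only [hchars, hcount]
  have hthis : ddNat n =
      ((Nat.toDigits 10 n).countP (fun d => d ∈ "02468".toList) : Int)
        - ((Nat.toDigits 10 n).countP (fun d => d ∈ "13579".toList) : Int) := by
    rw [← hd]; rfl
  apply Bool.eq_iff_iff.mpr
  simp only [beq_iff_eq, decide_eq_true_iff]
  omega

-- proof-side mirror of A's inner while loop on a plain list (the None sentinel stripped)
def scanB (t : Int) : Nat → List Int → Int → List Int
  | 0, res, _ => res
  | fuel + 1, res, an =>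
    if PySem.List.len res < t then
      scanB t fuel (if okA an then res ++ [an] else res) (an + 1)
    else res

lemma whileAB (t : Int) : ∀ (fuel : Nat) (res : List Int) (an : Int),
    (auptoWhileA (t + 1) fuel ((none : Option Int) :: res.map some) an).1
      = none :: (scanB t fuel res an).map some := by
  intro fuel
  induction fuel with
  | zero => intro res an; rfl
  | succ f IH =>
    intro res an
    have hcond : (PySem.List.len ((none : Option Int) :: res.map some) < t + 1)
        ↔ (PySem.List.len res < t) := by
      simp [PySem.List.len_eq]
    by_cases hc : PySem.List.len res < t
    · rw [auptoWhileA, scanB, if_pos (hcond.mpr hc), if_pos hc]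
      have harm : (if okA an then ((none : Option Int) :: res.map some) ++ [some an]
            else (none : Option Int) :: res.map some)
          = none :: (if okA an then res ++ [an] else res).map some := by
        by_cases hb : okA an <;> simp [hb]
      rw [harm]
      exact IH (if okA an then res ++ [an] else res) (an + 1)
    · rw [auptoWhileA, scanB, if_neg (fun hh => hc (hcond.mp hh)), if_neg hc]

lemma whileA_fix (t : Int) : ∀ (fuel : Nat) (alst : List (Option Int)) (an : Int),
    auptoWhileA t (auptoWhileA t fuel alst an).2.2 (auptoWhileA t fuel alst an).1
        (auptoWhileA t fuel alst an).2.1 = auptoWhileA t fuel alst an := by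
  intro fuel
  induction fuel with
  | zero => intro alst an; rfl
  | succ f IH =>
    intro alst an
    by_cases hc : PySem.List.len alst < t
    · rw [auptoWhileA, if_pos hc]
      exact IH _ _
    · rw [auptoWhileA, if_neg hc, auptoWhileA, if_neg hc]

lemma foldl_const_fix {α β : Type} (step : α → α) (s : α) (hs : step s = s) :
    ∀ l : List β, l.foldl (fun a _ => step a) s = s := by
  intro l; induction l with
  | nil => rfl
  | cons x xs ih => simpa [List.foldl_cons, hs] using ih

-- the balanced numbers among a + 0, …, a + (len-1), in increasing order
def balsIn (a len : Nat) : List Int :=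
  (List.range len).filterMap (fun i => if ddNat (a + i) = 0 then some ((a + i : Nat) : Int) else none)

lemma balsIn_append (a m n : Nat) :
    balsIn a (m + n) = balsIn a m ++ balsIn (a + m) n := by
  unfold balsIn
  rw [List.range_add, List.filterMap_append, List.filterMap_map]
  congr 1
  apply List.filterMap_congr
  intro i _
  simp [Function.comp, Nat.add_assoc]

lemma balsIn_succ (a f : Nat) :
    balsIn a (f + 1) = (if ddNat a = 0 then [(a : Int)] else []) ++ balsIn (a + 1) f := by
  have h1 : balsIn a 1 = (if ddNat a = 0 then [(a : Int)] else []) := by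
    unfold balsIn
    simp only [List.range_one, List.filterMap]
    by_cases h : ddNat a = 0 <;> simp [h]
  calc balsIn a (f + 1) = balsIn a (1 + f) := by rw [Nat.add_comm]
    _ = balsIn a 1 ++ balsIn (a + 1) f := balsIn_append a 1 f
    _ = _ := by rw [h1]

lemma scanB_eq : ∀ (fuel : Nat) (t : Int) (res : List Int) (an : Nat),
    t ≤ (res.length : Int) + ((balsIn an fuel).length : Int) →
    scanB t fuel res (an : Int) = res ++ (balsIn an fuel).take (t - res.length).toNat := by
  intro fuel
  induction fuel with
  | zero =>
    intro t res an h
    have hnil : balsIn an 0 = [] := by simp [balsIn]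
    rw [hnil] at h ⊢
    simp only [List.length_nil, Nat.cast_zero, add_zero] at h
    have h0 : (t - res.length).toNat = 0 := by omega
    simp [scanB, h0]
  | succ f IH =>
    intro t res an h
    have hcast : ((an : Int) + 1) = ((an + 1 : Nat) : Int) := by push_cast; ring
    rw [scanB, okA_eq an, balsIn_succ]
    rw [balsIn_succ] at h
    by_cases hc : PySem.List.len res < t
    · rw [if_pos hc]
      rw [PySem.List.len_eq] at hc
      by_cases hb : ddNat an = 0
      · simp only [hb, decide_true, if_true]
        rw [hcast, IH t (res ++ [(an : Int)]) (an + 1) (by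
          simp only [hb, if_true, List.length_append, List.length_cons, List.length_singleton,
            List.length_nil, List.singleton_append] at h ⊢
          push_cast at h ⊢
          omega)]
        have h1 : (t - res.length).toNat = (t - (res ++ [(an : Int)]).length).toNat + 1 := by
          simp only [List.length_append, List.length_singleton]
          omega
        simp only [hb, if_true, List.singleton_append, h1, List.take_succ_cons,
          List.append_assoc, List.cons_append, List.nil_append, List.length_append,
          List.length_singleton]
      · simp only [hb, decide_false, if_false, Bool.false_eq_true]
        rw [hcast, IH t res (an + 1) (by
          simp only [hb, if_false, List.nil_append] at h
          omega)]
        simp [hb]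
    · rw [if_neg hc]
      rw [PySem.List.len_eq] at hc
      have h0 : (t - res.length).toNat = 0 := by omega
      simp [h0]

-- ===== digit-DP side =====

def pmN (b : Nat) : Int := if b % 2 = 0 then 1 else -1

-- even-minus-odd count of the r low digits of b (b read as an r-digit string with leading zeros)
def ddP : Nat → Nat → Int
  | 0, _ => 0
  | r + 1, b => pmN (b / 10 ^ r) + ddP r (b % 10 ^ r)

lemma ddP_split (r d b : Nat) (hb : b < 10 ^ r) :
    ddP (r + 1) (d * 10 ^ r + b) = pmN d + ddP r b := by
  have hp : 0 < 10 ^ r := Nat.pow_pos (by norm_num)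
  have h1 : (d * 10 ^ r + b) / 10 ^ r = d := by
    rw [Nat.add_comm, Nat.add_mul_div_right _ _ hp, Nat.div_eq_of_lt hb]; omega
  have h2 : (d * 10 ^ r + b) % 10 ^ r = b := by
    rw [Nat.mul_add_mod', Nat.mod_eq_of_lt hb]
  simp [ddP, h1, h2]

lemma ddP_abs_le (r : Nat) : ∀ b, |ddP r b| ≤ (r : Int) := by
  induction r with
  | zero => intro b; simp [ddP]
  | succ r IH =>
    intro b
    have h2 := abs_le.mp (IH (b % 10 ^ r))
    simp only [ddP, pmN]
    rw [abs_le]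
    split_ifs <;> push_cast <;> omega

lemma ddP_parity (r : Nat) : ∀ b, (2 : Int) ∣ (ddP r b - r) := by
  induction r with
  | zero => intro b; simp [ddP]
  | succ r IH =>
    intro b
    have := IH (b % 10 ^ r)
    simp only [ddP, pmN]
    split_ifs <;> push_cast <;> omega

lemma ddP_low (r : Nat) : ∀ b, b < 10 ^ (r + 1) →
    ddP (r + 1) b = pmN (b % 10) + ddP r (b / 10) := by
  induction r with
  | zero =>
    intro b hb
    have hb' : b % 10 = b := Nat.mod_eq_of_lt (by simpa using hb)
    simp [ddP, hb']
  | succ r IH =>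
    intro b _
    have hmod : b % 10 ^ (r + 1) < 10 ^ (r + 1) := Nat.mod_lt _ (Nat.pow_pos (by norm_num))
    have e1 : b % 10 ^ (r + 1) % 10 = b % 10 :=
      Nat.mod_mod_of_dvd b (dvd_pow_self 10 (by omega))
    have e2 : b / 10 / 10 ^ r = b / 10 ^ (r + 1) := by
      rw [Nat.div_div_eq_div_mul, ← pow_succ']
    have e3 : b % 10 ^ (r + 1) / 10 = b / 10 % 10 ^ r := by
      rw [pow_succ']
      exact Nat.mod_mul_right_div_self b 10 (10 ^ r)
    show pmN (b / 10 ^ (r + 1)) + ddP (r + 1) (b % 10 ^ (r + 1))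
        = pmN (b % 10) + ddP (r + 1) (b / 10)
    rw [IH (b % 10 ^ (r + 1)) hmod, e1, e3]
    show _ = pmN (b % 10) + (pmN (b / 10 / 10 ^ r) + ddP r (b / 10 % 10 ^ r))
    rw [e2]; ring

lemma dd_eq_ddP : ∀ (L n : Nat), 10 ^ L ≤ n → n < 10 ^ (L + 1) → ddNat n = ddP (L + 1) n := by
  intro L
  induction L with
  | zero =>
    intro n h1 h2
    norm_num at h1 h2
    have hz : n / 10 = 0 := Nat.div_eq_of_lt h2
    rw [ddP_low 0 n (by simpa using h2), ddNat]
    rw [Nat.mod_eq_of_lt h2]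
    simp [hz, ddP, pmN]
  | succ L IH =>
    intro n h1 h2
    have hq1 : 10 ^ L ≤ n / 10 := by
      rw [Nat.le_div_iff_mul_le (by norm_num)]
      calc 10 ^ L * 10 = 10 ^ (L + 1) := by rw [pow_succ]
        _ ≤ n := h1
    have hq2 : n / 10 < 10 ^ (L + 1) := by
      rw [Nat.div_lt_iff_lt_mul (by norm_num)]
      calc n < 10 ^ (L + 2) := h2
        _ = 10 ^ (L + 1) * 10 := by rw [pow_succ]
    have hpow : 0 < 10 ^ L := Nat.pow_pos (by norm_num)
    have hz : ¬ n / 10 = 0 := by omega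
    rw [ddP_low (L + 1) n h2, ← IH (n / 10) hq1 hq2, ddNat]
    simp [hz, pmN]

-- the DP row: r-digit suffixes (leading zeros allowed) with even-minus-odd count diff
def rowL (r : Nat) (diff : Int) : List Int :=
  (List.range (10 ^ r)).filterMap (fun b => if ddP r b = diff then some ((b : Nat) : Int) else none)

lemma rowL_zero (diff : Int) : rowL 0 diff = if diff = 0 then [(0 : Int)] else [] := by
  unfold rowL
  simp only [pow_zero, List.range_one, List.filterMap]
  by_cases h : diff = 0 <;> simp [ddP, h, eq_comm]

lemma rowL_out (r : Nat) (diff : Int) (h : (r : Int) < |diff|) : rowL r diff = [] := by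
  unfold rowL
  rw [List.filterMap_eq_nil_iff]
  intro b _
  have h2 := abs_le.mp (ddP_abs_le r b)
  have hne : ddP r b ≠ diff := by
    rcases abs_cases diff with ⟨h3, _⟩ | ⟨h3, _⟩ <;> rw [h3] at h <;> omega
  simp [hne]

lemma range_mul_flatMap (a b : Nat) :
    List.range (a * b) = (List.range a).flatMap (fun i => (List.range b).map (fun j => i * b + j)) := by
  induction a with
  | zero => simp
  | succ a IH =>
    rw [Nat.succ_mul, List.range_add, IH, List.range_succ, List.flatMap_append]
    simp

lemma cur_eq (suff : PySem.Dict Int (List Int)) (r : Nat) (diff : Int)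
    (hgood : ∀ k, suff.getD k [] = rowL r k) :
    curB suff ((10 ^ r : Nat) : Int) diff = rowL (r + 1) diff := by
  have hpr : PySem.List.pyRange 0 10 1 = (List.range 10).map (fun k : Nat => (k : Int)) := by
    rw [PySem.List.pyRange_one]
    norm_num
    rfl
  unfold curB rowL
  rw [hpr, List.flatMap_map,
    show (10 : Nat) ^ (r + 1) = 10 * 10 ^ r from by rw [pow_succ'],
    range_mul_flatMap, List.filterMap_flatMap]
  apply List.flatMap_congr
  intro d _
  rw [hgood (diff - pmI (d : Int))]
  unfold rowL
  rw [List.map_filterMap, List.filterMap_map]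
  apply List.filterMap_congr
  intro b hb
  have hblt : b < 10 ^ r := List.mem_range.mp hb
  have hpm : pmI (d : Int) = pmN d := by
    unfold pmI pmN
    rw [show (2 : Int) = ((2 : Nat) : Int) from rfl, PySem.Int.mod_natCast]
    by_cases h : d % 2 = 0 <;> simp [h] <;> omega
  rw [hpm]
  simp only [Function.comp_apply]
  rw [ddP_split r d b hblt]
  by_cases hcond : ddP r b = diff - pmI (d : Int)
  · rw [hpm] at hcond
    rw [if_pos hcond, if_pos (by omega)]
    have hv : ((d : Int) * ((10 ^ r : Nat) : Int) + (b : Int)) = ((d * 10 ^ r + b : Nat) : Int) := by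
      push_cast; ring
    simp [hv]
  · rw [hpm] at hcond
    rw [if_neg hcond, if_neg (by omega)]
    simp

lemma getD_foldl_condInsert (g : Int → List Int) (ks : List Int) :
    ∀ (d0 : PySem.Dict Int (List Int)) (k : Int),
    (ks.foldl (fun acc diff => let cur := g diff; if cur.isEmpty then acc else acc.insert diff cur) d0).getD k []
      = if k ∈ ks ∧ (g k).isEmpty = false then g k else d0.getD k [] := by
  induction ks with
  | nil => intro d0 k; simp
  | cons x xs IH =>
    intro d0 k
    rw [List.foldl_cons, IH]
    have hstep : ((if (g x).isEmpty then d0 else d0.insert x (g x))).getD k []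
        = if k = x ∧ (g x).isEmpty = false then g x else d0.getD k [] := by
      by_cases he : (g x).isEmpty = true
      · rw [if_pos he, if_neg (by simp [he])]
      · have he' : (g x).isEmpty = false := by simpa using he
        rw [if_neg he, PySem.Dict.getD_insert]
        by_cases hk : k = x
        · subst hk; simp [he']
        · simp [hk]
    show (if k ∈ xs ∧ (g k).isEmpty = false then g k
        else ((if (g x).isEmpty then d0 else d0.insert x (g x))).getD k [])
      = if k ∈ x :: xs ∧ (g k).isEmpty = false then g k else d0.getD k []
    rw [hstep]
    by_cases h1 : k ∈ xs ∧ (g k).isEmpty = false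
    · simp [h1, List.mem_cons, h1.1, h1.2]
    · rw [if_neg h1]
      by_cases h2 : k = x ∧ (g x).isEmpty = false
      · obtain ⟨rfl, hgx⟩ := h2
        simp [hgx, List.mem_cons]
      · rw [if_neg h2, if_neg (by
          rintro ⟨hmem, hge⟩
          rcases List.mem_cons.mp hmem with rfl | hmem'
          · exact h2 ⟨rfl, hge⟩
          · exact h1 ⟨hmem', hge⟩)]

lemma rowB_good (suff : PySem.Dict Int (List Int)) (r : Nat)
    (hgood : ∀ k, suff.getD k [] = rowL r k) :
    ∀ k, (rowB suff ((10 ^ r : Nat) : Int) (((r + 1 : Nat)) : Int)).getD k [] = rowL (r + 1) k := by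
  intro k
  unfold rowB
  rw [getD_foldl_condInsert (curB suff ((10 ^ r : Nat) : Int))]
  by_cases hin : k ∈ PySem.List.pyRange (-((r + 1 : Nat) : Int)) (((r + 1 : Nat) : Int) + 1) 1
      ∧ (curB suff ((10 ^ r : Nat) : Int) k).isEmpty = false
  · rw [if_pos hin]
    exact cur_eq suff r k hgood
  · rw [if_neg hin]
    have hmtd : (PySem.Dict.mk ([] : List (Int × List Int))).getD k [] = [] := rfl
    rw [hmtd]
    by_cases hmem : k ∈ PySem.List.pyRange (-((r + 1 : Nat) : Int)) (((r + 1 : Nat) : Int) + 1) 1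
    · have hemp : (curB suff ((10 ^ r : Nat) : Int) k).isEmpty = true := by
        rcases Bool.eq_false_or_eq_true (curB suff ((10 ^ r : Nat) : Int) k).isEmpty with h | h
        · exact h
        · exact absurd ⟨hmem, h⟩ hin
      rw [← cur_eq suff r k hgood]
      exact (List.isEmpty_iff.mp hemp).symm
    · rw [PySem.List.mem_pyRange_one] at hmem
      refine (rowL_out (r + 1) k ?_).symm
      rcases abs_cases k with ⟨h3, _⟩ | ⟨h3, _⟩ <;> rw [h3] <;> push_cast at hmem ⊢ <;> omega

lemma getD_mk01 (k : Int) :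
    (PySem.Dict.mk [((0 : Int), [(0 : Int)])]).getD k [] = if k = 0 then [(0 : Int)] else [] := by
  rw [PySem.Dict.getD_eq_get?_getD, PySem.Dict.get?_mk_cons]
  have he : ({ items := [] } : PySem.Dict Int (List Int)).get? k = none := rfl
  by_cases h : k = 0
  · simp [h]
  · simp [h, he, Ne.symm h]

lemma blockSt (m : Nat) :
    (∀ k, ((PySem.List.pyRange 1 ((m + 1 : Nat) : Int) 1).foldl
        (fun (st : PySem.Dict Int (List Int) × Int) r => (rowB st.1 st.2 r, st.2 * 10))
        (PySem.Dict.mk [((0 : Int), [(0 : Int)])], (1 : Int))).1.getD k [] = rowL m k)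
    ∧ ((PySem.List.pyRange 1 ((m + 1 : Nat) : Int) 1).foldl
        (fun (st : PySem.Dict Int (List Int) × Int) r => (rowB st.1 st.2 r, st.2 * 10))
        (PySem.Dict.mk [((0 : Int), [(0 : Int)])], (1 : Int))).2 = ((10 ^ m : Nat) : Int) := by
  induction m with
  | zero =>
    rw [show ((0 + 1 : Nat) : Int) = 1 from by norm_num, PySem.List.pyRange_one_eq_nil (by norm_num),
      List.foldl_nil]
    refine ⟨fun k => ?_, by norm_num⟩
    rw [rowL_zero]
    exact getD_mk01 k
  | succ m IH =>
    have hsplit : PySem.List.pyRange 1 ((m + 1 + 1 : Nat) : Int) 1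
        = PySem.List.pyRange 1 ((m + 1 : Nat) : Int) 1 ++ [((m + 1 : Nat) : Int)] := by
      rw [show ((m + 1 + 1 : Nat) : Int) = ((m + 1 : Nat) : Int) + 1 from by push_cast; ring]
      exact PySem.List.pyRange_one_succ_right (a := 1) (b := ((m + 1 : Nat) : Int)) (by
        have : (0 : Int) ≤ (m : Int) := Int.natCast_nonneg m
        push_cast; omega)
    rw [hsplit, List.foldl_append, List.foldl_cons, List.foldl_nil]
    obtain ⟨IH1, IH2⟩ := IH
    constructor
    · intro k
      show (rowB _ _ _).getD k [] = _
      rw [IH2]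
      exact rowB_good _ m IH1 k
    · show _ * 10 = _
      rw [IH2]
      push_cast [pow_succ]
      ring

lemma blockB_eq (k : Nat) (hk : 1 ≤ k) :
    blockB ((2 * k : Nat) : Int) = balsIn (10 ^ (2 * k - 1)) (9 * 10 ^ (2 * k - 1)) := by
  obtain ⟨m, hm⟩ : ∃ m, 2 * k = m + 1 := ⟨2 * k - 1, by omega⟩
  rw [show 2 * k - 1 = m from by omega, hm]
  unfold blockB
  obtain ⟨h1, h2⟩ := blockSt m
  simp only [h2, h1]

  have hpr : PySem.List.pyRange 1 10 1 = (List.range 9).map (fun e : Nat => ((1 : Int) + e)) := by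
    rw [PySem.List.pyRange_one]
    norm_num
    rfl
  rw [hpr, List.flatMap_map]
  unfold balsIn
  rw [range_mul_flatMap 9 (10 ^ m), List.filterMap_flatMap]
  apply List.flatMap_congr
  intro e he
  have helt : e < 9 := List.mem_range.mp he
  have hif : (if PySem.Int.mod ((1 : Int) + e) 2 == 0 then (-1 : Int) else 1) = -(pmN (1 + e)) := by
    rw [show ((1 : Int) + e) = (((1 + e : Nat)) : Int) from by push_cast; ring,
      show (2 : Int) = ((2 : Nat) : Int) from rfl, PySem.Int.mod_natCast]
    unfold pmN
    by_cases h : (1 + e) % 2 = 0 <;> simp [h] <;> omega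
  rw [hif]
  unfold rowL
  rw [List.map_filterMap, List.filterMap_map]
  apply List.filterMap_congr
  intro b hb
  have hblt : b < 10 ^ m := List.mem_range.mp hb
  have hp0 : 0 < 10 ^ m := Nat.pow_pos (by norm_num)
  have harr : 10 ^ m + (e * 10 ^ m + b) = (1 + e) * 10 ^ m + b := by ring
  have hlo : 10 ^ m ≤ (1 + e) * 10 ^ m + b :=
    le_trans (Nat.le_mul_of_pos_left _ (by omega)) (Nat.le_add_right _ _)
  have hhi : (1 + e) * 10 ^ m + b < 10 ^ (m + 1) := by
    have h9 : (1 + e) * 10 ^ m ≤ 9 * 10 ^ m := Nat.mul_le_mul_right _ (by omega)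
    have : (10 : Nat) ^ (m + 1) = 10 * 10 ^ m := by rw [pow_succ']
    omega
  have hdd : ddNat (10 ^ m + (e * 10 ^ m + b)) = pmN (1 + e) + ddP m b := by
    rw [harr, dd_eq_ddP m _ hlo hhi, ddP_split m (1 + e) b hblt]
  simp only [Function.comp_apply]
  by_cases hc : ddP m b = -(pmN (1 + e))
  · rw [if_pos hc, if_pos (by rw [hdd, hc]; ring)]
    simp only [Option.map_some, Option.some.injEq]
    push_cast
    ring
  · rw [if_neg hc, if_neg (by rw [hdd]; intro h0; exact hc (by omega))]
    simp

lemma odd_empty (k : Nat) (hk : 1 ≤ k) :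
    balsIn (10 ^ (2 * k - 2)) (10 ^ (2 * k - 1) - 10 ^ (2 * k - 2)) = [] := by
  unfold balsIn
  rw [List.filterMap_eq_nil_iff]
  intro i hi
  have hilt : i < 10 ^ (2 * k - 1) - 10 ^ (2 * k - 2) := List.mem_range.mp hi
  obtain ⟨j, hj⟩ : ∃ j, 2 * k - 2 = j := ⟨2 * k - 2, rfl⟩
  have hj1 : 2 * k - 1 = j + 1 := by omega
  have hlo : 10 ^ j ≤ 10 ^ j + i := Nat.le_add_right _ _
  have hhi : 10 ^ j + i < 10 ^ (j + 1) := by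
    have hp : (10 : Nat) ^ (j + 1) = 10 ^ j * 10 := pow_succ 10 j
    rw [hj, hj1] at hilt
    omega
  rw [hj]
  have hdd := dd_eq_ddP j (10 ^ j + i) hlo hhi
  have hpar := ddP_parity (j + 1) (10 ^ j + i)
  have hjodd : ¬ (2 : Int) ∣ ((j + 1 : Nat) : Int) := by
    rw [Int.two_dvd_ne_zero]
    have h1 : (j + 1) % 2 = 1 := by omega
    omega
  have hne : ddP (j + 1) (10 ^ j + i) ≠ 0 := by
    intro h0
    rw [h0] at hpar
    exact hjodd (by omega)
  simp [hdd, hne]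

lemma bals_step (k : Nat) (hk : 1 ≤ k) :
    balsIn 0 (10 ^ (2 * k)) = balsIn 0 (10 ^ (2 * k - 2)) ++ blockB ((2 * k : Nat) : Int) := by
  have h1 : (10 : Nat) ^ (2 * k - 1) = 10 ^ (2 * k - 2) * 10 := by
    rw [← pow_succ]; congr 1; omega
  have h2 : (10 : Nat) ^ (2 * k) = 10 ^ (2 * k - 1) * 10 := by
    rw [← pow_succ]; congr 1; omega
  have harith : 10 ^ (2 * k) = 10 ^ (2 * k - 2)
      + ((10 ^ (2 * k - 1) - 10 ^ (2 * k - 2)) + 9 * 10 ^ (2 * k - 1)) := by omega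
  rw [harith, balsIn_append, balsIn_append, blockB_eq k hk]
  rw [show (0 : Nat) + 10 ^ (2 * k - 2) = 10 ^ (2 * k - 2) from by omega]
  rw [odd_empty k hk, List.nil_append]
  rw [show 10 ^ (2 * k - 2) + (10 ^ (2 * k - 1) - 10 ^ (2 * k - 2)) = 10 ^ (2 * k - 1) from by omega]

lemma loopB_run : ∀ (f : Nat) (k : Nat) (t : Int),
    t ≤ ((balsIn 0 (10 ^ (2 * (k + f)))).length : Int) →
    ∃ m : Nat, loopB t f (balsIn 0 (10 ^ (2 * k))) ((2 * k : Int) + 2) = balsIn 0 (10 ^ (2 * m))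
      ∧ t ≤ ((balsIn 0 (10 ^ (2 * m))).length : Int) := by
  intro f
  induction f with
  | zero =>
    intro k t h
    exact ⟨k, rfl, by simpa using h⟩
  | succ f IH =>
    intro k t h
    rw [loopB]
    by_cases hc : PySem.List.len (balsIn 0 (10 ^ (2 * k))) < t
    · rw [if_pos hc]
      have hstep : balsIn 0 (10 ^ (2 * k)) ++ blockB ((2 * k : Int) + 2) = balsIn 0 (10 ^ (2 * (k + 1))) := by
        have hb := bals_step (k + 1) (by omega)
        rw [show 2 * (k + 1) - 2 = 2 * k from by omega] at hb
        rw [show ((2 * k : Int) + 2) = (((2 * (k + 1) : Nat)) : Int) from by push_cast; ring]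
        exact hb.symm
      rw [hstep, show (2 * k : Int) + 2 + 2 = (2 * ((k + 1 : Nat) : Int)) + 2 from by push_cast; ring]
      exact IH (k + 1) t (by rw [show k + 1 + f = k + (f + 1) from by omega]; exact h)
    · rw [if_neg hc]
      rw [PySem.List.len_eq] at hc
      exact ⟨k, rfl, by omega⟩

-- ===== counting: enough balanced numbers exist =====

-- m ↦ the number whose digits are those of m, each followed by its parity-complement digit
def encB (m : Nat) : Nat :=
  if m = 0 then 0 else encB (m / 10) * 100 + (m % 10) * 10 + (m % 10 + 1) % 10
decreasing_by omega

def decB (x : Nat) : Nat :=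
  if x = 0 then 0 else decB (x / 100) * 10 + (x / 10) % 10
decreasing_by omega

lemma encB_zero : encB 0 = 0 := by rw [encB]; simp

lemma encB_ge10 : ∀ m, 1 ≤ m → 10 ≤ encB m := by
  intro m
  induction m using Nat.strong_induction_on with
  | _ m IH =>
    intro hm
    rw [encB, if_neg (by omega)]
    by_cases h : m < 10
    · have h10 : m / 10 = 0 := Nat.div_eq_of_lt h
      have hmm : m % 10 = m := Nat.mod_eq_of_lt h
      omega
    · have := IH (m / 10) (by omega) (by omega)
      omega

lemma decB_encB : ∀ m, decB (encB m) = m := by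
  intro m
  induction m using Nat.strong_induction_on with
  | _ m IH =>
    by_cases hm : m = 0
    · subst hm; rw [encB_zero, decB]; simp
    · rw [encB, if_neg hm]
      have hr : m % 10 < 10 := Nat.mod_lt _ (by norm_num)
      have hr' : (m % 10 + 1) % 10 < 10 := Nat.mod_lt _ (by norm_num)
      have hE0 : encB (m / 10) * 100 + m % 10 * 10 + (m % 10 + 1) % 10 ≠ 0 := by
        by_cases h : m < 10
        · have h10 : m / 10 = 0 := Nat.div_eq_of_lt h
          have hmm : m % 10 = m := Nat.mod_eq_of_lt h
          omega
        · have := encB_ge10 (m / 10) (by omega)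
          omega
      rw [decB, if_neg hE0]
      have hdiv : (encB (m / 10) * 100 + m % 10 * 10 + (m % 10 + 1) % 10) / 100 = encB (m / 10) := by
        omega
      have h10a : (encB (m / 10) * 100 + m % 10 * 10 + (m % 10 + 1) % 10) / 10
          = encB (m / 10) * 10 + m % 10 := by omega
      have hmid : (encB (m / 10) * 100 + m % 10 * 10 + (m % 10 + 1) % 10) / 10 % 10 = m % 10 := by
        rw [h10a]; omega
      rw [hdiv, hmid, IH (m / 10) (by omega)]
      omega

set_option maxRecDepth 4096 in
lemma dd_encB : ∀ m, 1 ≤ m → ddNat (encB m) = 0 := by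
  intro m
  induction m using Nat.strong_induction_on with
  | _ m IH =>
    intro hm
    by_cases h : m < 10
    · rw [encB, if_neg (by omega)]
      have h0 : m / 10 = 0 := Nat.div_eq_of_lt h
      have hmm : m % 10 = m := Nat.mod_eq_of_lt h
      rw [h0, encB_zero, hmm]
      rw [show 0 * 100 + m * 10 + (m + 1) % 10 = m * 10 + (m + 1) % 10 from by ring, ddNat]
      have e1 : (m * 10 + (m + 1) % 10) % 10 = (m + 1) % 10 := by omega
      have e2 : (m * 10 + (m + 1) % 10) / 10 = m := by omega
      rw [e1, e2, if_neg (show ¬ m = 0 by omega), ddNat, hmm, h0]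
      simp only [if_pos rfl]
      have hpar : (m + 1) % 10 % 2 ≠ m % 2 := by
        by_cases h9 : m = 9
        · subst h9; norm_num
        · have hq : (m + 1) % 10 = m + 1 := Nat.mod_eq_of_lt (by omega)
          omega
      split_ifs <;> omega
    · have h10 := encB_ge10 (m / 10) (by omega)
      rw [encB, if_neg (by omega)]
      have hr : m % 10 < 10 := Nat.mod_lt _ (by norm_num)
      have hr' : (m % 10 + 1) % 10 < 10 := Nat.mod_lt _ (by norm_num)
      rw [ddNat]
      have hEmod : (encB (m / 10) * 100 + m % 10 * 10 + (m % 10 + 1) % 10) % 10 = (m % 10 + 1) % 10 := by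
        omega
      have hEdiv : (encB (m / 10) * 100 + m % 10 * 10 + (m % 10 + 1) % 10) / 10
          = encB (m / 10) * 10 + m % 10 := by omega
      rw [hEmod, hEdiv, if_neg (by omega : ¬ encB (m / 10) * 10 + m % 10 = 0), ddNat]
      have h1 : (encB (m / 10) * 10 + m % 10) % 10 = m % 10 := by omega
      have h2 : (encB (m / 10) * 10 + m % 10) / 10 = encB (m / 10) := by omega
      rw [h1, h2, if_neg (by omega : ¬ encB (m / 10) = 0), IH (m / 10) (by omega) (by omega)]
      have hpar : (m % 10 + 1) % 10 % 2 ≠ m % 10 % 2 := by omega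
      split_ifs <;> omega

lemma encB_lt (F : Nat) : ∀ m, m < 10 ^ F → encB m < 100 ^ F := by
  induction F with
  | zero =>
    intro m hm
    have : m = 0 := by simpa using Nat.lt_one_iff.mp (by simpa using hm)
    subst this
    simp [encB_zero]
  | succ F IH =>
    intro m hm
    by_cases h0 : m = 0
    · subst h0
      simp only [encB_zero]
      exact Nat.pow_pos (by norm_num)
    · rw [encB, if_neg h0]
      have hq : m / 10 < 10 ^ F := by
        rw [Nat.div_lt_iff_lt_mul (by norm_num)]
        calc m < 10 ^ (F + 1) := hm
          _ = 10 ^ F * 10 := by rw [pow_succ]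
      have he := IH (m / 10) hq
      have hr : m % 10 < 10 := Nat.mod_lt _ (by norm_num)
      have hr' : (m % 10 + 1) % 10 < 10 := Nat.mod_lt _ (by norm_num)
      have hpow : (100 : Nat) ^ (F + 1) = 100 ^ F * 100 := pow_succ 100 F
      omega

lemma bals_count (F N : Nat) (h : 100 ^ F ≤ N) :
    ((10 : Nat) ^ F - 1 : Nat) ≤ (balsIn 0 N).length := by
  have hlen : ((List.range (10 ^ F - 1)).map (fun m => ((encB (m + 1) : Nat) : Int))).length
      = 10 ^ F - 1 := by simp
  have hnd : ((List.range (10 ^ F - 1)).map (fun m => ((encB (m + 1) : Nat) : Int))).Nodup := by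
    refine List.Nodup.map ?_ (List.nodup_range)
    intro a b hab
    have h1 : encB (a + 1) = encB (b + 1) := Int.natCast_inj.mp (by simpa using hab)
    have h2 := congrArg decB h1
    rw [decB_encB, decB_encB] at h2
    omega
  have hsub : ((List.range (10 ^ F - 1)).map (fun m => ((encB (m + 1) : Nat) : Int)))
      ⊆ balsIn 0 N := by
    intro x hx
    simp only [List.mem_map, List.mem_range] at hx
    obtain ⟨m, hm, rfl⟩ := hx
    have hp : 0 < (10 : Nat) ^ F := Nat.pow_pos (by norm_num)
    have h1 : encB (m + 1) < N := lt_of_lt_of_le (encB_lt F (m + 1) (by omega)) h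
    have h2 : ddNat (encB (m + 1)) = 0 := dd_encB (m + 1) (by omega)
    unfold balsIn
    exact List.mem_filterMap.mpr ⟨encB (m + 1), List.mem_range.mpr h1, by simp [h2]⟩
  have h3 := List.toFinset_card_of_nodup hnd
  have h4 : ((List.range (10 ^ F - 1)).map (fun m => ((encB (m + 1) : Nat) : Int))).toFinset
      ⊆ (balsIn 0 N).toFinset := by
    intro x hx
    rw [List.mem_toFinset] at hx ⊢
    exact hsub hx
  have h5 := Finset.card_le_card h4
  have h6 := List.toFinset_card_le (balsIn 0 N)
  omega

lemma take_bals (M N : Nat) (t : Nat) (hMN : M ≤ N) (ht : t ≤ (balsIn 0 M).length) :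
    (balsIn 0 M).take t = (balsIn 0 N).take t := by
  have hsplit : balsIn 0 N = balsIn 0 M ++ balsIn M (N - M) := by
    have h := balsIn_append 0 M (N - M)
    rw [show M + (N - M) = N from by omega] at h
    simpa using h
  rw [hsplit, List.take_append_of_le_length ht]

lemma hdd0 : ddNat 0 = 1 := by rw [ddNat]; norm_num

lemma balsIn_one : balsIn 0 (10 ^ (2 * 0)) = [] := by
  unfold balsIn
  simp [List.range_one, hdd0]

-- ===== VERDICT (by name: the statement is the Claim_ definition above) =====
theorem aupto_spec : Claim_equal_aupto := by
  intro nn hdom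
  have hdom' : nn ≤ 2147483648 := by
    have h := of_decide_eq_true hdom
    exact h.2
  unfold Spec_aupto aupto aupto_alt
  by_cases hnn : 0 < nn
  · -- enough balanced numbers below both fuel bounds
    have hA := bals_count 10 100000000000000000000 (by norm_num)
    norm_num at hA
    have hBcnt := bals_count 64 (10 ^ (2 * (0 + 64))) (by
      rw [show (100 : Nat) = 10 ^ 2 from by norm_num, ← pow_mul])
    have h64 : (2147483649 : Nat) ≤ 10 ^ 64 - 1 := by norm_num
    -- ===== B reduces to a take of the canonical list =====
    obtain ⟨m, hm1, hm2⟩ := loopB_run 64 0 nn (by omega)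
    have hBside : PySem.List.slice (loopB nn 64 [] 2) none (some nn)
        = (balsIn 0 (10 ^ (2 * m))).take nn.toNat := by
      rw [show (2 : Int) = 2 * ((0 : Nat) : Int) + 2 from by norm_num,
        show ([] : List Int) = balsIn 0 (10 ^ (2 * 0)) from balsIn_one.symm, hm1]
      exact PySem.List.slice_to _ (le_of_lt hnn)
    -- ===== A reduces to a take of the canonical list =====
    rw [PySem.List.pyRange_one_cons (by omega : (1 : Int) < nn + 1), List.foldl_cons]
    show ((List.foldl (fun (st : List (Option Int) × Int × Nat) (_n : Int) =>
            auptoWhileA (nn + 1) st.2.2 st.1 st.2.1)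
          (auptoWhileA (nn + 1) 100000000000000000000 [none] 0)
          (PySem.List.pyRange 2 (nn + 1))).1.drop 1).filterMap id = _
    rw [foldl_const_fix (fun st : List (Option Int) × Int × Nat =>
          auptoWhileA (nn + 1) st.2.2 st.1 st.2.1)
        (auptoWhileA (nn + 1) 100000000000000000000 [none] 0)
        (whileA_fix (nn + 1) 100000000000000000000 [none] 0)
        (PySem.List.pyRange 2 (nn + 1))]
    have hW := whileAB nn 100000000000000000000 [] 0
    simp only [List.map_nil] at hW
    rw [hW]
    have hscan := scanB_eq 100000000000000000000 nn [] 0 (by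
      simp only [List.length_nil, Nat.cast_zero, zero_add]
      omega)
    simp only [Nat.cast_zero] at hscan
    rw [hscan, hBside]
    -- ===== both are take nn of the balanced list =====
    simp only [List.length_nil, Nat.cast_zero, Int.sub_zero, List.nil_append,
      List.drop_succ_cons, List.drop_zero, List.filterMap_map, Function.comp_def, id_eq,
      List.filterMap_some]
    have hFA : (100000000000000000000 : Nat) = 10 ^ 20 := by norm_num
    rcases le_total (2 * m) 20 with hcmp | hcmp
    · have hle : (10 : Nat) ^ (2 * m) ≤ 10 ^ 20 := Nat.pow_le_pow_right (by norm_num) hcmp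
      have ht : nn.toNat ≤ (balsIn 0 (10 ^ (2 * m))).length := by omega
      rw [hFA, ← take_bals (10 ^ (2 * m)) (10 ^ 20) nn.toNat hle ht]
    · have hle : (10 : Nat) ^ 20 ≤ 10 ^ (2 * m) := Nat.pow_le_pow_right (by norm_num) hcmp
      have ht : nn.toNat ≤ (balsIn 0 (10 ^ 20)).length := by
        rw [← hFA]; omega
      rw [hFA, take_bals (10 ^ 20) (10 ^ (2 * m)) nn.toNat hle ht]
  · -- nn ≤ 0 : both sides are []
    rw [PySem.List.pyRange_one_eq_nil (by omega : nn + 1 ≤ 1), List.foldl_nil]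
    have hloop : loopB nn 64 [] 2 = [] := by
      show loopB nn (63 + 1) [] 2 = []
      rw [loopB, if_neg (by
        rw [PySem.List.len_eq]
        simp only [List.length_nil, Nat.cast_zero]
        omega)]
    rw [hloop]
    simp [PySem.List.slice]
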